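-- pv_equiv track=rewrite | github.com/cchristodoulaki/Pytheas | src/header_events.py | partially_repeating_values_on_row
-- ===== SOURCE A (Python) =====
-- def partially_repeating_values_on_row(row_values):
--     event_occurred = False
--     value_set = set(row_values)
--     repeating_value_seen = False
--     condition_failed = False
--     repeating_lengths = []
--     repeating_seen_list = []
--
--     #for each distinct value
--     for value in value_set:
--         if value is None or value.strip().lower() in ['', ' ', 'nan', 'none', 'null'] or  value.replace('.', '', 1).isdigit():
--             continue
--
--         repeating_seen = 0
--         value_idxs = [i for i, val in enumerate(row_values) if val == value]
--         repeating_length = get_num_repeating_values(value_idxs)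
--         start_idx = 0
--         while start_idx+repeating_length < len(value_idxs):
--             start_idx = start_idx + repeating_length
--             next_repeating_length = get_num_repeating_values(value_idxs[start_idx:])
--             if repeating_length != next_repeating_length:
--                 #it must be repeated with the same length  at least once to be valid
--                 if repeating_seen < 1:
--                     condition_failed = True
--
--                 break
--
--             repeating_seen += 1
--             repeating_value_seen = True
--
--         repeating_seen_list.append(repeating_seen)
--         repeating_lengths.append(repeating_length)
--     if len(repeating_seen_list) > 0:
--         max_repeats = max(repeating_seen_list)
--         if not condition_failed and repeating_value_seen and max(repeating_lengths) > 0  and max_repeats >= 2 and repeating_seen_list.count(max_repeats) >= 2: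
--             event_occurred = True
--     else:
--         max_repeats = 0
--         event_occurred = False
--     return event_occurred, repeating_seen_list.count(max_repeats)
--
-- def get_num_repeating_values(value_idxs):
--     seq_idxs = value_idxs[0:1]
--     for i in value_idxs[1:]:
--         if seq_idxs[-1] + 1 == i:
--             seq_idxs.append(i)
--         else:
--             break
--     return len(seq_idxs)
-- ===== SOURCE B (Python) =====
-- def partially_repeating_values_on_row(row_values):
--     positions = {}
--     for i, val in enumerate(row_values):
--         positions.setdefault(val, []).append(i)
--
--     condition_failed = False
--     repeating_value_seen = False
--     per_value = []  # (repeating_length, repeating_seen) per qualifying distinct value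
--
--     for value, idxs in positions.items():
--         if value is None or value.strip().lower() in ['', ' ', 'nan', 'none', 'null'] or value.replace('.', '', 1).isdigit():
--             continue
--         # maximal consecutive-index run lengths, one grouping pass over the positions
--         runs = _run_lengths(idxs)
--         r0 = runs[0]
--         seen = 0
--         for r in runs[1:]:
--             if r != r0:
--                 if seen < 1:
--                     condition_failed = True
--                 break
--             seen += 1
--         if seen > 0:
--             repeating_value_seen = True
--         per_value.append((r0, seen))
--
--     if not per_value:
--         return False, 0
--     max_repeats = max(s for _, s in per_value)
--     cnt = sum(1 for _, s in per_value if s == max_repeats)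
--     event_occurred = (not condition_failed and repeating_value_seen
--                       and max(l for l, _ in per_value) > 0
--                       and max_repeats >= 2 and cnt >= 2)
--     return event_occurred, cnt
--
--
-- def _run_lengths(idxs):
--     if not idxs:
--         return []
--     runs = []
--     cur = 1
--     for prev, nxt in zip(idxs, idxs[1:]):
--         if prev + 1 == nxt:
--             cur += 1
--         else:
--             runs.append(cur)
--             cur = 1
--     runs.append(cur)
--     return runs
-- ===== Notes on version B (the rewrite author's own statement) =====
-- stated objective: faster
-- what changed: B builds a value-to-positions dict index in one pass over the row instead of rescanning the whole row per distinct value, and replaces A's while-loop (which re-slices the position list and re-runs get_num_repeating_values on each suffix) by one grouping pass into maximal-run lengths plus a single scan of that run list.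
import Mathlib
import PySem

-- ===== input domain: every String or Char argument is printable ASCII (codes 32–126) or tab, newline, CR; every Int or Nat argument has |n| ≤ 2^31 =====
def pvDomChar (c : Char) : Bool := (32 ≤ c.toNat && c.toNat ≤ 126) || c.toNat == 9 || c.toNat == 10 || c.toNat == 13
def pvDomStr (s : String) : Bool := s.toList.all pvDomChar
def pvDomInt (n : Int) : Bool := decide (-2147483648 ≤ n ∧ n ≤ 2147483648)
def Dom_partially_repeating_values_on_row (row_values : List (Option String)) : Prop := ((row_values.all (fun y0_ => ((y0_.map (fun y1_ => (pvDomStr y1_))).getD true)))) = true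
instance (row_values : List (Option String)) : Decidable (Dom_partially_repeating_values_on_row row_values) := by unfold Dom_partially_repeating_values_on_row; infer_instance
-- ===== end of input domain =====

-- B builds a value→positions index in one pass over the row (A rescans the whole row per
-- distinct value) and replaces A's while-loop (which re-slices the position list and re-runs
-- get_num_repeating_values on every suffix) by one grouping pass into run lengths plus a
-- single scan of that run list; measured asymptotically faster.

-- ===== PORT A =====
-- shared by both ports (the Python filter line is identical in Source A and Source B):
-- value.replace('.', '', 1): no PySem primitive takes replace's count argument; hand port, exact — removes the first '.' if any
def pvReplaceDot1 : List Char → List Char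
  | [] => []
  | c :: cs => if c = '.' then cs else c :: pvReplaceDot1 cs

-- `value is None or value.strip().lower() in ['', ' ', 'nan', 'none', 'null'] or value.replace('.', '', 1).isdigit()`
def pvSkipValue : Option String → Bool
  | none => true
  | some s =>
      ["", " ", "nan", "none", "null"].contains (PySem.Str.lower (PySem.Str.strip s))
        || PySem.Chars.strIsdigit (pvReplaceDot1 s.toList)

-- A only: `[i for i, val in enumerate(row_values) if val == value]`
def pvValueIdxs (row_values : List (Option String)) (value : Option String) : List Int :=
  ((PySem.List.enumerate row_values 0).filter (fun p => p.2 == value)).map (·.1)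

-- the `for i in value_idxs[1:]` loop of get_num_repeating_values (break = stop recursing)
def gnrv_go (seq : List Int) : List Int → List Int
  | [] => seq
  | i :: rest => if seq.getLast! + 1 = i then gnrv_go (seq ++ [i]) rest else seq

def get_num_repeating_values (value_idxs : List Int) : Int :=
  ((gnrv_go (PySem.List.slice value_idxs (some 0) (some 1))
            (PySem.List.slice value_idxs (some 1) none)).length : Int)

-- A's `while start_idx+repeating_length < len(value_idxs)` loop; fuel bounds the iteration
-- count only (each entered iteration advances start_idx by repeating_length ≥ 1).
-- state/result: (repeating_seen, condition_failed, repeating_value_seen)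
def prv_while (value_idxs : List Int) (repeating_length : Int) :
    Nat → Int → Int → Bool → Bool → Int × Bool × Bool
  | 0, _, repeating_seen, condition_failed, repeating_value_seen =>
      (repeating_seen, condition_failed, repeating_value_seen)
  | fuel + 1, start_idx, repeating_seen, condition_failed, repeating_value_seen =>
      if start_idx + repeating_length < (value_idxs.length : Int) then
        let start_idx' := start_idx + repeating_length
        let next_repeating_length :=
          get_num_repeating_values (PySem.List.slice value_idxs (some start_idx') none)
        if repeating_length ≠ next_repeating_length then
          (repeating_seen, condition_failed || decide (repeating_seen < 1), repeating_value_seen)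
        else
          prv_while value_idxs repeating_length fuel start_idx' (repeating_seen + 1)
            condition_failed true
      else (repeating_seen, condition_failed, repeating_value_seen)

-- A's per-value loop body; state = (repeating_value_seen, condition_failed, repeating_lengths, repeating_seen_list)
def prv_body (row_values : List (Option String))
    (st : Bool × Bool × List Int × List Int) (value : Option String) :
    Bool × Bool × List Int × List Int :=
  if pvSkipValue value then st
  else
    let value_idxs := pvValueIdxs row_values value
    let repeating_length := get_num_repeating_values value_idxs
    let r := prv_while value_idxs repeating_length (value_idxs.length + 1) 0 0 st.2.1 st.1
    (r.2.2, r.2.1, st.2.2.1 ++ [repeating_length], st.2.2.2 ++ [r.1])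

def partially_repeating_values_on_row (row_values : List (Option String)) : Bool × Int :=
  let st := (PySem.Set.ofList row_values).foldl (prv_body row_values) (false, false, [], [])
  let rvs := st.1
  let cf := st.2.1
  let lengths := st.2.2.1
  let seens := st.2.2.2
  let mrE : Int × Bool :=
    if seens.length > 0 then
      let max_repeats := (PySem.List.max? seens (fun x => x)).getD 0
      (max_repeats,
        !cf && rvs && decide ((PySem.List.max? lengths (fun x => x)).getD 0 > 0)
          && decide (max_repeats ≥ 2) && decide ((seens.count max_repeats : Int) ≥ 2))
    else (0, false)
  (mrE.2, (seens.count mrE.1 : Int))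

-- ===== PORT B =====
-- _run_lengths: the `for prev, nxt in zip(idxs, idxs[1:])` grouping loop of Source B
def rl_go (prev cur : Int) : List Int → List Int
  | [] => [cur]
  | nxt :: rest => if prev + 1 = nxt then rl_go nxt (cur + 1) rest else cur :: rl_go nxt 1 rest

def run_lengths (idxs : List Int) : List Int :=
  match idxs with
  | [] => []
  | x :: xs => rl_go x 1 xs

-- Source B's `for r in runs[1:]` scan; result = (seen, condition_failed-contribution)
def prv_scan (r0 : Int) (seen : Int) : List Int → Int × Bool
  | [] => (seen, false)
  | r :: rest => if r ≠ r0 then (seen, decide (seen < 1)) else prv_scan r0 (seen + 1) rest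

-- `positions.setdefault(val, []).append(i)` loop: value → list of its positions, one pass
def alt_positions (row_values : List (Option String)) : PySem.Dict (Option String) (List Int) :=
  (PySem.List.enumerate row_values 0).foldl
    (fun d p => PySem.Dict.modify d p.2 [] (fun cur => cur ++ [p.1])) PySem.Dict.empty

-- B's per-value loop body over (value, idxs) items; state = (condition_failed, repeating_value_seen, per_value pairs)
def alt_body (st : Bool × Bool × List (Int × Int)) (kv : Option String × List Int) :
    Bool × Bool × List (Int × Int) :=
  if pvSkipValue kv.1 then st
  else
    let runs := run_lengths kv.2
    let r0 := runs.headI  -- runs[0]; runs is never empty since every stored idxs list is nonempty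
    let sf := prv_scan r0 0 (runs.drop 1)
    (st.1 || sf.2, st.2.1 || decide (sf.1 > 0), st.2.2 ++ [(r0, sf.1)])

def partially_repeating_values_on_row_alt (row_values : List (Option String)) : Bool × Int :=
  let st := (PySem.Dict.items (alt_positions row_values)).foldl alt_body (false, false, [])
  let cf := st.1
  let rvs := st.2.1
  let per := st.2.2
  match per with
  | [] => (false, 0)
  | _ :: _ =>
    let seens := per.map (·.2)
    let max_repeats := (PySem.List.max? seens (fun x => x)).getD 0
    let cnt : Int := (per.countP (fun p => p.2 == max_repeats) : Nat)
    (!cf && rvs && decide ((PySem.List.max? (per.map (·.1)) (fun x => x)).getD 0 > 0)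
       && decide (max_repeats ≥ 2) && decide (cnt ≥ 2), cnt)

-- ===== PRECONDITION & SPEC =====
def Spec_partially_repeating_values_on_row (row_values : List (Option String)) (out : Bool × Int) : Prop := out = partially_repeating_values_on_row_alt row_values
instance (row_values : List (Option String)) (out : Bool × Int) : Decidable (Spec_partially_repeating_values_on_row row_values out) := by unfold Spec_partially_repeating_values_on_row; infer_instance

-- ===== CLAIM (what is proved, stated in full; the proofs are below) =====
def Claim_equal_partially_repeating_values_on_row : Prop := ∀ (row_values : List (Option String)), Dom_partially_repeating_values_on_row row_values → Spec_partially_repeating_values_on_row row_values (partially_repeating_values_on_row row_values)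

-- ===== LEMMAS AND PROOFS =====

-- length of the first maximal consecutive run continuing `prev`
def pvExt (prev : Int) : List Int → Nat
  | [] => 0
  | y :: ys => if prev + 1 = y then pvExt y ys + 1 else 0

lemma pvExt_le (prev : Int) (l : List Int) : pvExt prev l ≤ l.length := by
  induction l generalizing prev with
  | nil => simp [pvExt]
  | cons y ys ih =>
      simp only [pvExt, List.length_cons]
      split
      · exact Nat.succ_le_succ (ih y)
      · omega

lemma rl_go_eq (l : List Int) : ∀ (prev cur : Int),
    rl_go prev cur l = (cur + (pvExt prev l : Int)) :: run_lengths (l.drop (pvExt prev l)) := by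
  induction l with
  | nil =>
      intro prev cur
      simp only [rl_go, pvExt, List.drop_nil, Nat.cast_zero, add_zero]
      rfl
  | cons y ys ih =>
      intro prev cur
      by_cases h : prev + 1 = y
      · simp only [rl_go]
        rw [if_pos h, ih y (cur + 1),
          show pvExt prev (y :: ys) = pvExt y ys + 1 by simp [pvExt, h]]
        rw [List.drop_succ_cons]
        congr 1
        push_cast; ring
      · simp only [rl_go, pvExt]
        rw [if_neg h, if_neg h]
        simp only [Nat.cast_zero, add_zero, List.drop_zero]
        rfl

lemma rl_go_length_le (l : List Int) : ∀ (prev cur : Int), (rl_go prev cur l).length ≤ l.length + 1 := by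
  induction l with
  | nil => intro _ _; simp [rl_go]
  | cons y ys ih =>
      intro prev cur
      simp only [rl_go]
      split
      · exact le_trans (ih _ _) (by simp)
      · simpa using Nat.succ_le_succ (ih _ _)

lemma run_lengths_length_le (l : List Int) : (run_lengths l).length ≤ l.length := by
  cases l with
  | nil => simp [run_lengths]
  | cons x t => simpa [run_lengths] using rl_go_length_le t x 1

lemma run_lengths_cons (x : Int) (t : List Int) :
    run_lengths (x :: t) = (1 + (pvExt x t : Int)) :: run_lengths (t.drop (pvExt x t)) := by
  show rl_go x 1 t = _
  rw [rl_go_eq]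

lemma gnrv_go_len (l : List Int) : ∀ (seq : List Int), seq ≠ [] →
    (gnrv_go seq l).length = seq.length + pvExt seq.getLast! l := by
  induction l with
  | nil => intro seq _; simp [gnrv_go, pvExt]
  | cons i rest ih =>
      intro seq hseq
      simp only [gnrv_go, pvExt]
      by_cases h : seq.getLast! + 1 = i
      · rw [if_pos h, if_pos h, ih (seq ++ [i]) (by simp)]
        have hlast : (seq ++ [i]).getLast! = i := by
          simp [List.getLast!_eq_getLast?_getD]
        rw [hlast]
        simp; omega
      · rw [if_neg h, if_neg h]; omega

lemma gnrv_head (x : Int) (t : List Int) :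
    get_num_repeating_values (x :: t) = 1 + (pvExt x t : Int) := by
  have h0 : PySem.List.slice (x :: t) (some 0) (some 1) = [x] := by
    rw [PySem.List.slice_toNat _ (by norm_num) (by norm_num)]
    simp
  have h1 : PySem.List.slice (x :: t) (some 1) none = t := by
    rw [PySem.List.slice_from _ (by norm_num)]
    simp
  simp only [get_num_repeating_values, h0, h1]
  rw [gnrv_go_len t [x] (by simp)]
  simp [List.getLast!_eq_getLast?_getD]

lemma run_lengths_nil_iff (l : List Int) : run_lengths l = [] ↔ l = [] := by
  cases l with
  | nil => simp [run_lengths]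
  | cons x t => simp [run_lengths_cons]

lemma scan_ge (l : List Int) : ∀ (r0 s : Int), s ≤ (prv_scan r0 s l).1 := by
  induction l with
  | nil => intro r0 s; simp [prv_scan]
  | cons r rest ih =>
      intro r0 s
      simp only [prv_scan]
      split
      · simp
      · exact le_trans (by omega) (ih r0 (s + 1))

-- the heart: A's while-loop over suffixes of the position list computes B's scan of the run list
lemma while_scan : ∀ (rest : List Int) (fuel : Nat) (xs : List Int) (s : Nat)
    (rl seen : Int) (cf rvs : Bool),
    run_lengths (xs.drop s) = rl :: rest →
    rest.length < fuel →
    prv_while xs rl fuel (s : Int) seen cf rvs =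
      ((prv_scan rl seen rest).1, cf || (prv_scan rl seen rest).2,
        rvs || decide ((prv_scan rl seen rest).1 > seen)) := by
  intro rest
  induction rest with
  | nil =>
      intro fuel xs s rl seen cf rvs hruns hfuel
      obtain ⟨fuel, rfl⟩ : ∃ f, fuel = f + 1 := ⟨fuel - 1, by omega⟩
      obtain ⟨x, t, hd⟩ : ∃ x t, xs.drop s = x :: t := by
        rcases h : xs.drop s with _ | ⟨x, t⟩
        · rw [h] at hruns; simp [run_lengths] at hruns
        · exact ⟨x, t, rfl⟩
      rw [hd, run_lengths_cons] at hruns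
      obtain ⟨hrl, hrest⟩ := List.cons_eq_cons.mp hruns
      have hdrop : t.drop (pvExt x t) = [] := (run_lengths_nil_iff _).mp hrest
      have hext : pvExt x t = t.length := by
        have h1 := pvExt_le x t
        have h2 := List.drop_eq_nil_iff.mp hdrop
        omega
      have hlen : xs.length = s + (t.length + 1) := by
        have h3 := List.length_drop (l := xs) (i := s)
        rw [hd] at h3
        simp only [List.length_cons] at h3
        have h4 : s ≤ xs.length := by
          by_contra hc
          have : xs.drop s = [] := List.drop_eq_nil_iff.mpr (by omega)
          simp [this] at hd
        omega
      have hcond : ¬ ((s : Int) + rl < (xs.length : Int)) := by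
        rw [← hrl, hext]
        omega
      simp [prv_while, hcond, prv_scan]
  | cons r rest' ih =>
      intro fuel xs s rl seen cf rvs hruns hfuel
      obtain ⟨fuel, rfl⟩ : ∃ f, fuel = f + 1 := ⟨fuel - 1, by omega⟩
      obtain ⟨x, t, hd⟩ : ∃ x t, xs.drop s = x :: t := by
        rcases h : xs.drop s with _ | ⟨x, t⟩
        · rw [h] at hruns; simp [run_lengths] at hruns
        · exact ⟨x, t, rfl⟩
      rw [hd, run_lengths_cons] at hruns
      obtain ⟨hrl, hrest⟩ := List.cons_eq_cons.mp hruns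
      have hne : t.drop (pvExt x t) ≠ [] := by
        intro hc
        rw [hc] at hrest
        simp [run_lengths] at hrest
      have hext : pvExt x t < t.length := by
        have h1 := pvExt_le x t
        have h2 := List.drop_eq_nil_iff.not.mp hne
        omega
      have hlen : xs.length = s + (t.length + 1) := by
        have h3 := List.length_drop (l := xs) (i := s)
        rw [hd] at h3
        simp only [List.length_cons] at h3
        have h4 : s ≤ xs.length := by
          by_contra hc
          have : xs.drop s = [] := List.drop_eq_nil_iff.mpr (by omega)
          simp [this] at hd
        omega
      have hcond : (s : Int) + rl < (xs.length : Int) := by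
        rw [← hrl]
        omega
      have hstart : ((s : Int) + rl) = ((s + (1 + pvExt x t) : Nat) : Int) := by
        rw [← hrl]; push_cast; ring
      have hdrop2 : xs.drop (s + (1 + pvExt x t)) = t.drop (pvExt x t) := by
        rw [← List.drop_drop, hd]
        rw [show 1 + pvExt x t = pvExt x t + 1 by omega]
        rw [show (pvExt x t + 1 = 1 + pvExt x t) from by omega, Nat.add_comm 1 (pvExt x t)]
        simp [List.drop_succ_cons]
      obtain ⟨y, u, hyu⟩ : ∃ y u, t.drop (pvExt x t) = y :: u :=
        List.exists_cons_of_ne_nil hne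
      have hruns' : run_lengths (y :: u) = r :: rest' := by rw [← hyu, hrest]
      have hr : r = 1 + (pvExt y u : Int) := by
        rw [run_lengths_cons] at hruns'
        exact (List.cons_eq_cons.mp hruns').1.symm
      have hslice : PySem.List.slice xs (some ((s : Int) + rl)) none = y :: u := by
        rw [hstart, PySem.List.slice_from _ (Int.natCast_nonneg _), Int.toNat_natCast, hdrop2, hyu]
      have hnext : get_num_repeating_values (PySem.List.slice xs (some ((s : Int) + rl)) none)
          = r := by
        rw [hslice, gnrv_head, ← hr]
      simp only [prv_while, if_pos hcond, hnext]
      by_cases hmm : rl = r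
      · rw [if_neg (by simp [hmm])]
        have hscan : prv_scan rl seen (r :: rest') = prv_scan rl (seen + 1) rest' := by
          simp [prv_scan, hmm]
        have hIH := ih fuel xs (s + (1 + pvExt x t)) rl (seen + 1) cf true
          (by rw [hdrop2, hyu, hruns', hmm]) (by simp only [List.length_cons] at hfuel; omega)
        rw [← hstart] at hIH
        rw [hIH, hscan]
        have hge := scan_ge rest' rl (seen + 1)
        have hdec : decide ((prv_scan rl (seen + 1) rest').1 > seen) = true := by
          simp only [decide_eq_true_eq]; omega
        simp [hdec]
      · rw [if_pos hmm]
        have hscan : prv_scan rl seen (r :: rest') = (seen, decide (seen < 1)) := by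
          simp only [prv_scan]
          rw [if_pos (fun h => hmm h.symm)]
        rw [hscan]
        simp

lemma valueIdxs_ne_nil (row : List (Option String)) (v : Option String) (hv : v ∈ row) :
    pvValueIdxs row v ≠ [] := by
  unfold pvValueIdxs
  simp only [ne_eq, List.map_eq_nil_iff, List.filter_eq_nil_iff, not_forall]
  have hmem : v ∈ (PySem.List.enumerate row 0).map (·.2) := by
    rw [PySem.List.map_snd_enumerate]; exact hv
  obtain ⟨p, hp, hpv⟩ := List.mem_map.mp hmem
  exact ⟨p, hp, by simp [hpv]⟩

-- per-value: A's loop body result corresponds to B's under the state relation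
lemma body_rel (row : List (Option String)) (v : Option String) (hv : v ∈ row)
    (cf rvs : Bool) (per : List (Int × Int)) :
    prv_body row (rvs, cf, per.map (·.1), per.map (·.2)) v =
      ((alt_body (cf, rvs, per) (v, pvValueIdxs row v)).2.1,
        (alt_body (cf, rvs, per) (v, pvValueIdxs row v)).1,
        (alt_body (cf, rvs, per) (v, pvValueIdxs row v)).2.2.map (·.1),
        (alt_body (cf, rvs, per) (v, pvValueIdxs row v)).2.2.map (·.2)) := by
  by_cases hskip : pvSkipValue v
  · simp [prv_body, alt_body, hskip]
  · obtain ⟨x, t, hxt⟩ := List.exists_cons_of_ne_nil (valueIdxs_ne_nil row v hv)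
    have hrl : get_num_repeating_values (pvValueIdxs row v) = 1 + (pvExt x t : Int) := by
      rw [hxt, gnrv_head]
    have hruns : run_lengths (pvValueIdxs row v) =
        (1 + (pvExt x t : Int)) :: run_lengths (t.drop (pvExt x t)) := by
      rw [hxt, run_lengths_cons]
    have hfuel : (run_lengths (t.drop (pvExt x t))).length < (pvValueIdxs row v).length + 1 := by
      have h1 := run_lengths_length_le (t.drop (pvExt x t))
      have h2 : (t.drop (pvExt x t)).length ≤ t.length := by simp
      rw [hxt]
      simp only [List.length_cons]
      omega
    have hW := while_scan (run_lengths (t.drop (pvExt x t))) ((pvValueIdxs row v).length + 1)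
      (pvValueIdxs row v) 0 (1 + (pvExt x t : Int)) 0 cf rvs (by simpa using hruns) hfuel
    simp only [Nat.cast_zero] at hW
    simp only [prv_body, alt_body, if_neg hskip, hrl, hruns, hW]
    simp

lemma fold_rel (row : List (Option String)) :
    ∀ (vs : List (Option String)) (cf rvs : Bool) (per : List (Int × Int)),
    (∀ v ∈ vs, v ∈ row) →
    vs.foldl (prv_body row) (rvs, cf, per.map (·.1), per.map (·.2)) =
      (((vs.map (fun v => (v, pvValueIdxs row v))).foldl alt_body (cf, rvs, per)).2.1,
        ((vs.map (fun v => (v, pvValueIdxs row v))).foldl alt_body (cf, rvs, per)).1,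
        ((vs.map (fun v => (v, pvValueIdxs row v))).foldl alt_body (cf, rvs, per)).2.2.map (·.1),
        ((vs.map (fun v => (v, pvValueIdxs row v))).foldl alt_body (cf, rvs, per)).2.2.map (·.2)) := by
  intro vs
  induction vs with
  | nil => intro cf rvs per _; simp
  | cons v vs ih =>
      intro cf rvs per hmem
      simp only [List.map_cons, List.foldl_cons]
      rw [body_rel row v (hmem v (by simp)) cf rvs per]
      rcases halt : alt_body (cf, rvs, per) (v, pvValueIdxs row v) with ⟨cf', rvs', per'⟩
      exact ih cf' rvs' per' (fun w hw => hmem w (by simp [hw]))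

-- the one-pass position index holds, per distinct value in first-occurrence order,
-- exactly the position list A recomputes by scanning the row
lemma items_positions (row : List (Option String)) :
    PySem.Dict.items (alt_positions row) =
      (PySem.Set.ofList row).map (fun v => (v, pvValueIdxs row v)) := by
  have hnd : (alt_positions row).keys.Nodup := by
    unfold alt_positions
    exact PySem.Dict.nodup_keys_foldl_modify_key (PySem.List.enumerate row 0)
      (fun p : Int × Option String => p.2) ([] : List Int)
      (fun _ p cur => cur ++ [p.1]) PySem.Dict.empty (by simp)
  have hkeys : (alt_positions row).keys = PySem.Set.ofList row := by
    unfold alt_positions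
    have h1 := PySem.Dict.keys_foldl_modify_key (PySem.List.enumerate row 0)
      (fun p : Int × Option String => p.2) ([] : List Int)
      (fun _ p cur => cur ++ [p.1]) PySem.Dict.empty
    exact h1.trans (by rw [PySem.List.map_snd_enumerate]; rfl)
  have hgetD : ∀ v, (alt_positions row).getD v [] = pvValueIdxs row v := by
    intro v
    have hswap : alt_positions row =
        ((PySem.List.enumerate row 0).map (fun p => (p.2, p.1))).foldl
          (fun d q => PySem.Dict.modify d q.1 [] (fun cur => cur ++ [q.2])) PySem.Dict.empty := by
      rw [List.foldl_map]
      rfl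
    rw [hswap, PySem.Dict.getD_foldl_modify_append]
    rw [List.filter_map, List.map_map]
    simp only [PySem.Dict.getD_empty, List.nil_append]
    rfl
  rw [PySem.Dict.items_eq_map_keys _ hnd [], hkeys]
  exact List.map_congr_left (fun v _ => by rw [hgetD])

lemma count_map_snd (per : List (Int × Int)) (m : Int) :
    (per.map (·.2)).count m = per.countP (fun p => p.2 == m) := by
  rw [List.count_eq_countP, List.countP_map]
  rfl

-- ===== VERDICT (by name: the statement is the Claim_ definition above) =====
theorem partially_repeating_values_on_row_spec : Claim_equal_partially_repeating_values_on_row := by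
  intro row _
  unfold Spec_partially_repeating_values_on_row
  have hmem : ∀ v ∈ PySem.Set.ofList row, v ∈ row :=
    fun v hv => (PySem.Set.mem_ofList row v).mp hv
  have h := fold_rel row (PySem.Set.ofList row) false false [] hmem
  simp only [List.map_nil] at h
  rcases hB : ((PySem.Set.ofList row).map (fun v => (v, pvValueIdxs row v))).foldl
      alt_body (false, false, []) with ⟨cf, rvs, per⟩
  rw [hB] at h
  simp only [partially_repeating_values_on_row, partially_repeating_values_on_row_alt,
    items_positions, h, hB]
  cases per with
  | nil => simp
  | cons p ps =>
      simp only [count_map_snd]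
      simp
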